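-- pv_equiv track=rewrite | github.com/jyajoo/Problem-Solving | Programmers/Lesson/121688.py | solution
-- ===== SOURCE A (Python) =====
-- import heapq
--
-- def solution(ability, number):
--     answer = sum(ability)
--     heapq.heapify(ability)
--     for i in range(number):
--         num1 = heapq.heappop(ability)
--         num2 = heapq.heappop(ability)
--         num = num1 + num2
--         heapq.heappush(ability, num)
--         heapq.heappush(ability, num)
--         answer += num
--     return answer
-- ===== SOURCE B (Python) =====
-- def _insort(lst, x):
--     i = 0
--     while i < len(lst) and lst[i] < x:
--         i += 1
--     lst.insert(i, x)
--
-- def solution(ability, number):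
--     answer = sum(ability)
--     ability.sort()
--     for _ in range(number):
--         num = ability.pop(0) + ability.pop(0)
--         _insort(ability, num)
--         _insort(ability, num)
--         answer += num
--     return answer
-- ===== Notes on version B (the rewrite author's own statement) =====
-- stated objective: alternative
-- what changed: Replaces the binary heap with a sorted list maintained by ordered insertion: sort once, pop the two head elements each round and reinsert the merged value twice at its sorted position.
import Mathlib
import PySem

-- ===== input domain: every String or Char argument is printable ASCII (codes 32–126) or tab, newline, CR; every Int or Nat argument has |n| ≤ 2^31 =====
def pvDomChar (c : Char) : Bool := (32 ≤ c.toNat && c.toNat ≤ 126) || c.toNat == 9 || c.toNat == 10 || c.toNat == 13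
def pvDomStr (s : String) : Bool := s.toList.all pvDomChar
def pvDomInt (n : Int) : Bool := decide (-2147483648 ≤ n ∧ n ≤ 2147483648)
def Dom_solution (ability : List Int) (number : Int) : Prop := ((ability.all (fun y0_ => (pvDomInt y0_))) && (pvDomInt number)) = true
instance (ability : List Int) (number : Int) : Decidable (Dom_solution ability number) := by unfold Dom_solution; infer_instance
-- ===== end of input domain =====

-- B replaces A's binary heap by a sorted list with ordered insertion (alternative decomposition);
-- only the RETURN value is compared: both mutate `ability` in place, leaving different residual orders.

-- ===== PORT A =====
-- heapq is a library; it is modeled by its contract: the heap is the multiset of its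
-- elements, heappop returns (and removes) a minimal element, heappush adds one,
-- heapify leaves the contents unchanged.  The returned value depends only on this.
def pvHeapPop (h : List Int) : Int × List Int :=
  let m := (PySem.List.min? h (fun v => v)).getD 0   -- heappop on [] raises: excluded by Pre_
  (m, h.erase m)

def solution (ability : List Int) (number : Int) : Int :=
  let answer := ability.sum
  let r := (PySem.List.pyRange 0 number 1).foldl
    (fun (st : List Int × Int) _ =>
      let p1 := pvHeapPop st.1
      let p2 := pvHeapPop p1.2
      let num := p1.1 + p2.1
      (num :: num :: p2.2, st.2 + num))
    (ability, answer)
  r.2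

-- ===== PORT B =====
-- _insort: linear scan to the first element ≥ x, insert there (Source B's helper, step for step)
def pvInsort (x : Int) : List Int → List Int
  | [] => [x]
  | y :: t => if y < x then y :: pvInsort x t else x :: y :: t

def solution_alt (ability : List Int) (number : Int) : Int :=
  let answer := ability.sum
  let s := PySem.List.sorted ability (fun v => v) false
  let r := (PySem.List.pyRange 0 number 1).foldl
    (fun (st : List Int × Int) _ =>
      match st.1 with
      | n1 :: n2 :: rest =>
        let num := n1 + n2
        (pvInsort num (pvInsort num rest), st.2 + num)
      | l => (l, st.2))   -- pop(0) would raise IndexError here: excluded by Pre_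
    (s, answer)
  r.2

-- ===== PRECONDITION & SPEC =====
-- A raises IndexError (heappop from a heap of fewer than 2 elements) when number > 0
-- and ability has fewer than 2 elements; those inputs are excluded.
def Pre_solution (ability : List Int) (number : Int) : Prop :=
  number ≤ 0 ∨ 2 ≤ ability.length
instance (ability : List Int) (number : Int) : Decidable (Pre_solution ability number) := by
  unfold Pre_solution; infer_instance
def pvWitness_solution : List Int × Int := ([3, 1, 2], 2)

def Spec_solution (ability : List Int) (number : Int) (out : Int) : Prop := out = solution_alt ability number
instance (ability : List Int) (number : Int) (out : Int) : Decidable (Spec_solution ability number out) := by unfold Spec_solution; infer_instance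

-- ===== CLAIM (what is proved, stated in full; the proofs are below) =====
def Claim_equal_solution : Prop := ∀ (ability : List Int) (number : Int), Dom_solution ability number → Pre_solution ability number → Spec_solution ability number (solution ability number)

-- ===== LEMMAS AND PROOFS =====

theorem pvInsort_perm (x : Int) (l : List Int) : (pvInsort x l).Perm (x :: l) := by
  induction l with
  | nil => simp [pvInsort]
  | cons y t ih =>
    simp only [pvInsort]
    split_ifs with h
    · exact ((ih.cons y).trans (List.Perm.swap x y t))
    · exact List.Perm.refl _

theorem pvInsort_sorted (x : Int) (l : List Int) (h : l.Pairwise (· ≤ ·)) :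
    (pvInsort x l).Pairwise (· ≤ ·) := by
  induction l with
  | nil => simp [pvInsort]
  | cons y t ih =>
    simp only [pvInsort]
    rcases List.pairwise_cons.mp h with ⟨hy, ht⟩
    split_ifs with hlt
    · refine List.pairwise_cons.mpr ⟨?_, ih ht⟩
      intro z hz
      have := (pvInsort_perm x t).mem_iff.mp hz
      rcases List.mem_cons.mp this with rfl | hz'
      · exact le_of_lt hlt
      · exact hy z hz'
    · refine List.pairwise_cons.mpr ⟨?_, h⟩
      intro z hz
      rcases List.mem_cons.mp hz with rfl | hz'
      · exact le_of_not_gt hlt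
      · exact le_trans (le_of_not_gt hlt) (hy z hz')

-- heappop on a multiset that is a permutation of a sorted list x :: t pops exactly x
theorem pvHeapPop_eq (a : List Int) (x : Int) (t : List Int)
    (hp : a.Perm (x :: t)) (hs : (x :: t).Pairwise (· ≤ ·)) :
    (pvHeapPop a).1 = x ∧ (pvHeapPop a).2.Perm t := by
  have hane : a ≠ [] := by
    intro h; subst h; exact (List.cons_ne_nil x t) hp.symm.eq_nil
  obtain ⟨m, hm⟩ : ∃ m, PySem.List.min? a (fun v => v) = some m := by
    cases hmin : PySem.List.min? a (fun v => v) with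
    | none => exact absurd ((PySem.List.min?_eq_none_iff a (fun v => v)).mp hmin) hane
    | some m => exact ⟨m, rfl⟩
  have hmem : m ∈ a := PySem.List.min?_mem hm
  have hmin : ∀ y ∈ a, m ≤ y := by
    intro y hy; exact PySem.List.min?_isMin hm y hy
  have hxa : x ∈ a := hp.mem_iff.mpr (List.mem_cons_self)
  have hmx : m ≤ x := hmin x hxa
  have hxm : x ≤ m := by
    have hmxt : m ∈ x :: t := hp.mem_iff.mp hmem
    rcases List.mem_cons.mp hmxt with rfl | hmt
    · exact le_refl _
    · exact (List.pairwise_cons.mp hs).1 m hmt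
  have hmeq : m = x := le_antisymm hmx hxm
  subst hmeq
  constructor
  · simp [pvHeapPop, hm]
  · have : (pvHeapPop a).2 = a.erase m := by simp [pvHeapPop, hm]
    rw [this]
    have := hp.erase m
    simpa [List.erase_cons_head] using this

-- the loop invariant: A's heap state is a permutation of B's sorted state,
-- B's state is sorted and keeps length ≥ 2, and the accumulated answers agree
theorem pvLoop_inv (L : List Int) : ∀ (a b : List Int) (ans : Int),
    a.Perm b → b.Pairwise (· ≤ ·) → 2 ≤ b.length →
    (let ra := L.foldl
        (fun (st : List Int × Int) _ =>
          let p1 := pvHeapPop st.1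
          let p2 := pvHeapPop p1.2
          let num := p1.1 + p2.1
          (num :: num :: p2.2, st.2 + num)) (a, ans)
     let rb := L.foldl
        (fun (st : List Int × Int) _ =>
          match st.1 with
          | n1 :: n2 :: rest =>
            let num := n1 + n2
            (pvInsort num (pvInsort num rest), st.2 + num)
          | l => (l, st.2)) (b, ans)
     ra.1.Perm rb.1 ∧ rb.1.Pairwise (· ≤ ·) ∧ 2 ≤ rb.1.length ∧ ra.2 = rb.2) := by
  induction L with
  | nil =>
    intro a b ans hp hs hl
    exact ⟨hp, hs, hl, rfl⟩
  | cons hd tl ih =>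
    intro a b ans hp hs hl
    match b, hl with
    | x :: y :: rest, _ =>
      have hs' : (y :: rest).Pairwise (· ≤ ·) := (List.pairwise_cons.mp hs).2
      have h1 := pvHeapPop_eq a x (y :: rest) hp hs
      have h2 := pvHeapPop_eq (pvHeapPop a).2 y rest h1.2 hs'
      have hnum : (pvHeapPop a).1 + (pvHeapPop (pvHeapPop a).2).1 = x + y := by
        rw [h1.1, h2.1]
      -- new states
      set num := x + y with hnumdef
      have hperm2 : ((((pvHeapPop a).1 + (pvHeapPop (pvHeapPop a).2).1)) ::
          (((pvHeapPop a).1 + (pvHeapPop (pvHeapPop a).2).1)) ::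
          (pvHeapPop (pvHeapPop a).2).2 : List Int).Perm
          (pvInsort num (pvInsort num rest)) := by
      -- num::num::(popped twice) ~ num::num::rest ~ insort num (insort num rest)
        have hr : ((pvHeapPop (pvHeapPop a).2).2).Perm rest := h2.2
        have hchain : (num :: num :: (pvHeapPop (pvHeapPop a).2).2 : List Int).Perm
            (pvInsort num (pvInsort num rest)) := by
          refine List.Perm.trans ((hr.cons num).cons num) ?_
          refine List.Perm.trans ?_ (pvInsort_perm num (pvInsort num rest)).symm
          exact ((pvInsort_perm num rest).symm.cons num)
        simpa [hnum] using hchain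
      have hsorted2 : (pvInsort num (pvInsort num rest)).Pairwise (· ≤ ·) :=
        pvInsort_sorted num _ (pvInsort_sorted num rest
          (List.pairwise_cons.mp hs').2)
      have hlen2 : 2 ≤ (pvInsort num (pvInsort num rest)).length := by
        have l1 := (pvInsort_perm num rest).length_eq
        have l2 := (pvInsort_perm num (pvInsort num rest)).length_eq
        simp [l1] at l2
        omega
      have := ih _ _ (ans + num) hperm2 hsorted2 hlen2
      simpa [List.foldl_cons, hnum] using this

-- ===== VERDICT (by name: the statement is the Claim_ definition above) =====
theorem solution_spec : Claim_equal_solution := by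
  intro ability number _ hpre
  unfold Spec_solution solution solution_alt
  by_cases hnum : number ≤ 0
  · rw [PySem.List.pyRange_one_eq_nil hnum]
    simp
  · have hlen : 2 ≤ ability.length := by
      rcases hpre with h | h
      · exact absurd h hnum
      · exact h
    have hperm : ability.Perm (PySem.List.sorted ability (fun v => v) false) :=
      (PySem.List.sorted_perm ability (fun v => v) false).symm
    have hsorted : (PySem.List.sorted ability (fun v => v) false).Pairwise (· ≤ ·) :=
      PySem.List.sorted_pairwise ability (fun v => v)
    have hl : 2 ≤ (PySem.List.sorted ability (fun v => v) false).length := by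
      rw [← hperm.length_eq]; exact hlen
    exact (pvLoop_inv (PySem.List.pyRange 0 number 1) ability _ ability.sum
      hperm hsorted hl).2.2.2
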